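-- pv_equiv track=rewrite | github.com/iulianpopa1/AdventOfCode | 2020/code/Day21.py | parse
-- ===== SOURCE A (Python) =====
-- def parse(inp):
--     allergenss = {}
--     ingredients = set()
--     for line in inp:
--         ingreds = set(line.split(" (contains ")[0].split())
--         allerg = line.split(" (contains ")[1][:-1].split(", ")
--
--         ingredients = set.union(ingredients, ingreds)
--
--         for allergen in allerg:
--             if allergen not in allergenss:
--                 allergenss[allergen] = ingreds
--             else:
--                 allergenss[allergen] = set.intersection(allergenss[allergen], ingreds)
--
--     for v in allergenss.values():
--         ingredients = set.difference(ingredients, set(v))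
--
--     return allergenss, ingredients
-- ===== SOURCE B (Python) =====
-- def parse(inp):
--     # Pass 1: collect the ingredient union and, per allergen, the list of
--     # ingredient sets of every food naming it (first-appearance order).
--     ingredients = set()
--     groups = {}
--     for line in inp:
--         parts = line.split(" (contains ")
--         ingreds = set(parts[0].split())
--         ingredients = set.union(ingredients, ingreds)
--         for allergen in parts[1][:-1].split(", "):
--             groups.setdefault(allergen, []).append(ingreds)
--     # Pass 2: reduce each allergen's collected sets to their intersection.
--     allergenss = {}
--     for allergen, sets in groups.items():
--         cand = sets[0]
--         for s in sets[1:]: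
--             cand = cand & s
--         allergenss[allergen] = cand
--     # Safe ingredients: the union minus every candidate set.
--     for cand in allergenss.values():
--         ingredients = ingredients - cand
--     return allergenss, ingredients
-- ===== Notes on version B (the rewrite author's own statement) =====
-- stated objective: alternative
-- what changed: B replaces A's incremental per-line dict intersection with a two-pass collect-then-reduce: pass 1 groups each allergen's list of ingredient sets, pass 2 reduces each list by intersection; A intersects inside the line loop.
import Mathlib
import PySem

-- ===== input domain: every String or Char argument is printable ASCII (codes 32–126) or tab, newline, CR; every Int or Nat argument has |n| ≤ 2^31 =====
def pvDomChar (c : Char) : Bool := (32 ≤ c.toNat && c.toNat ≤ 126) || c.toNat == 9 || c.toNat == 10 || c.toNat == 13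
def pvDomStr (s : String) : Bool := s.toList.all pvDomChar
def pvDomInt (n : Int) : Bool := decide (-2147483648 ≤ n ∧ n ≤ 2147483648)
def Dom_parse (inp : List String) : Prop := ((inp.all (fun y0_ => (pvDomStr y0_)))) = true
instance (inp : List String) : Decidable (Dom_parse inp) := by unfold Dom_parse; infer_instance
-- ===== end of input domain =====

-- B replaces A's incremental per-line intersection with a two-pass collect-then-reduce over a
-- grouping dict; same cost, alternative decomposition. Return-value equivalence only.

-- ===== PORT A =====
-- A: one pass; the allergen dict is intersected in place while scanning the lines.
def parse (inp : List String) : (List (String × List String)) × List String :=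
  let st := inp.foldl (fun (st : PySem.Dict String (List String) × List String) line =>
    let ingreds := PySem.Set.ofList (PySem.Str.split₀
      (PySem.List.pyGetD ((PySem.Str.split? line " (contains ").getD []) 0 ""))
    let allerg := (PySem.Str.split? (PySem.Str.slice
      (PySem.List.pyGetD ((PySem.Str.split? line " (contains ").getD []) 1 "") none (some (-1))) ", ").getD []
    let ingredients := PySem.Set.union st.2 ingreds
    let allergenss := allerg.foldl (fun d a =>
      if d.contains a = false then d.insert a ingreds
      else d.insert a (PySem.Set.inter (d.getD a []) ingreds)) st.1
    (allergenss, ingredients)) (PySem.Dict.empty, [])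
  let ingredients := st.1.values.foldl (fun ing v => PySem.Set.diff ing (PySem.Set.ofList v)) st.2
  (st.1.items, ingredients)

-- ===== PORT B =====
-- B's reduce helper: cand = sets[0]; for s in sets[1:]: cand = cand & s
def red (sets : List (List String)) : List String :=
  (PySem.List.slice sets (some 1) none).foldl PySem.Set.inter (PySem.List.pyGetD sets 0 [])

-- B: pass 1 groups, per allergen, the list of ingredient sets of the foods naming it;
-- pass 2 reduces each list by intersection; then the union minus every candidate set.
def parse_alt (inp : List String) : (List (String × List String)) × List String :=
  let st := inp.foldl (fun (st : List String × PySem.Dict String (List (List String))) line =>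
    let ingreds := PySem.Set.ofList (PySem.Str.split₀
      (PySem.List.pyGetD ((PySem.Str.split? line " (contains ").getD []) 0 ""))
    let ingredients := PySem.Set.union st.1 ingreds
    let groups := ((PySem.Str.split? (PySem.Str.slice
        (PySem.List.pyGetD ((PySem.Str.split? line " (contains ").getD []) 1 "") none (some (-1))) ", ").getD []).foldl
      (fun g a => g.modify a [] (fun l => l ++ [ingreds])) st.2
    (ingredients, groups)) ([], PySem.Dict.empty)
  let allergenss := st.2.items.foldl (fun (d : PySem.Dict String (List String)) p =>
    d.insert p.1 (red p.2)) PySem.Dict.empty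
  let ingredients := allergenss.values.foldl (fun ing c => PySem.Set.diff ing c) st.1
  (allergenss.items, ingredients)

-- ===== PRECONDITION & SPEC =====
-- Pre_ excludes exactly the lines missing the separator " (contains ", where A's `split(...)[1]`
-- raises IndexError (B raises there too).
def Pre_parse (inp : List String) : Prop :=
  (inp.all (fun line => PySem.Str.isIn " (contains " line)) = true
instance (inp : List String) : Decidable (Pre_parse inp) := by unfold Pre_parse; infer_instance
def pvWitness_parse : List String := ["x y (contains d, e)", "y z (contains d)"]

def Spec_parse (inp : List String) (out : (List (String × List String)) × List String) : Prop := out = parse_alt inp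
instance (inp : List String) (out : (List (String × List String)) × List String) : Decidable (Spec_parse inp out) := by unfold Spec_parse; infer_instance

-- ===== CLAIM (what is proved, stated in full; the proofs are below) =====
def Claim_equal_parse : Prop := ∀ (inp : List String), Dom_parse inp → Pre_parse inp → Spec_parse inp (parse inp)

-- ===== LEMMAS AND PROOFS =====

theorem red_nil : red [] = [] := by
  simp [red, PySem.List.slice_from _ (by norm_num : (0:Int) ≤ 1), PySem.List.pyGetD,
    PySem.List.pyGet?, PySem.List.pyIdx?]

theorem red_append (l : List (List String)) (s : List String) :
    red (l ++ [s]) = if l = [] then s else PySem.Set.inter (red l) s := by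
  cases l with
  | nil =>
    simp [red, PySem.List.slice_from _ (by norm_num : (0:Int) ≤ 1), PySem.List.pyGetD,
      PySem.List.pyGet?, PySem.List.pyIdx?]
  | cons x t =>
    simp [red, PySem.List.slice_from _ (by norm_num : (0:Int) ≤ 1)]

-- the invariant between A's allergen dict and B's grouping dict
def AB_Inv (d : PySem.Dict String (List String)) (g : PySem.Dict String (List (List String))) : Prop :=
  d.keys = g.keys ∧ g.keys.Nodup ∧
  (∀ k, g.contains k = true → g.getD k [] ≠ []) ∧
  (∀ k, d.getD k [] = red (g.getD k [])) ∧
  (∀ k, (d.getD k []).Nodup)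

theorem AB_Inv_empty : AB_Inv PySem.Dict.empty PySem.Dict.empty := by
  refine ⟨rfl, by simp [PySem.Dict.keys_empty], ?_, ?_, ?_⟩ <;>
    simp [PySem.Dict.getD_empty, PySem.Dict.contains_empty, red_nil]

theorem AB_Inv_step (d : PySem.Dict String (List String)) (g : PySem.Dict String (List (List String)))
    (a : String) (s : List String) (hs : s.Nodup) (h : AB_Inv d g) :
    AB_Inv (if d.contains a = false then d.insert a s
         else d.insert a (PySem.Set.inter (d.getD a []) s))
        (g.modify a [] (fun l => l ++ [s])) := by
  obtain ⟨hk, hnd, hne, hred, hvnd⟩ := h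
  have hc : d.contains a = g.contains a := by
    rw [PySem.Dict.contains_eq_decide_mem_keys, PySem.Dict.contains_eq_decide_mem_keys, hk]
  have hkeysg : (g.modify a [] (fun l => l ++ [s])).keys
      = (g.insert a ((g.getD a []) ++ [s])).keys := PySem.Dict.keys_modify g a [] _
  by_cases hga : g.contains a = true
  · have hd : d.contains a = true := by rw [hc]; exact hga
    rw [if_neg (by simp [hd])]
    refine ⟨?_, ?_, ?_, ?_, ?_⟩
    · rw [PySem.Dict.keys_insert_of_contains d _ hd, hkeysg,
        PySem.Dict.keys_insert_of_contains g _ hga, hk]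
    · rw [hkeysg, PySem.Dict.keys_insert_of_contains g _ hga]; exact hnd
    · intro k hkc
      rw [PySem.Dict.getD_modify]
      by_cases hka : k = a
      · simp [hka]
      · rw [if_neg hka]
        apply hne
        rw [PySem.Dict.contains_modify] at hkc
        simpa [hka] using hkc
    · intro k
      rw [PySem.Dict.getD_insert, PySem.Dict.getD_modify]
      by_cases hka : k = a
      · rw [if_pos hka, if_pos hka, red_append, if_neg (hne a hga), hred a]
      · rw [if_neg hka, if_neg hka]; exact hred k
    · intro k
      rw [PySem.Dict.getD_insert]
      by_cases hka : k = a
      · rw [if_pos hka]; exact PySem.Set.nodup_inter _ _ (hvnd a)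
      · rw [if_neg hka]; exact hvnd k
  · have hga' : g.contains a = false := by simpa using hga
    have hd : d.contains a = false := by rw [hc]; exact hga'
    have hmem : a ∉ g.keys := by
      rw [PySem.Dict.contains_eq_decide_mem_keys] at hga'
      simpa using hga'
    rw [if_pos hd]
    refine ⟨?_, ?_, ?_, ?_, ?_⟩
    · rw [PySem.Dict.keys_insert_of_not_contains d _ hd, hkeysg,
        PySem.Dict.keys_insert_of_not_contains g _ hga', hk]
    · rw [hkeysg, PySem.Dict.keys_insert_of_not_contains g _ hga']
      refine List.nodup_append.mpr ⟨hnd, List.nodup_singleton a, ?_⟩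
      intro x hx y hy
      rw [List.mem_singleton.mp hy]
      exact fun hh => hmem (hh ▸ hx)
    · intro k hkc
      rw [PySem.Dict.getD_modify]
      by_cases hka : k = a
      · simp [hka]
      · rw [if_neg hka]
        apply hne
        rw [PySem.Dict.contains_modify] at hkc
        simpa [hka] using hkc
    · intro k
      rw [PySem.Dict.getD_insert, PySem.Dict.getD_modify]
      by_cases hka : k = a
      · rw [if_pos hka, if_pos hka, PySem.Dict.getD_of_not_contains g _ hga', red_append]
        simp
      · rw [if_neg hka, if_neg hka]; exact hred k
    · intro k
      rw [PySem.Dict.getD_insert]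
      by_cases hka : k = a
      · rw [if_pos hka]; exact hs
      · rw [if_neg hka]; exact hvnd k

-- the inner allergen loop preserves the invariant
theorem AB_Inv_loop (al : List String) (s : List String) (hs : s.Nodup)
    (d : PySem.Dict String (List String)) (g : PySem.Dict String (List (List String)))
    (h : AB_Inv d g) :
    AB_Inv (al.foldl (fun d a =>
          if d.contains a = false then d.insert a s
          else d.insert a (PySem.Set.inter (d.getD a []) s)) d)
        (al.foldl (fun g a => g.modify a [] (fun l => l ++ [s])) g) := by
  induction al generalizing d g with
  | nil => exact h
  | cons a t ih => exact ih _ _ (AB_Inv_step d g a s hs h)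

-- the two line loops keep equal ingredient unions and invariant-related dicts
theorem main_loop (inp : List String)
    (d : PySem.Dict String (List String)) (g : PySem.Dict String (List (List String)))
    (ing : List String) (h : AB_Inv d g) :
    (inp.foldl (fun (st : PySem.Dict String (List String) × List String) line =>
      let ingreds := PySem.Set.ofList (PySem.Str.split₀
        (PySem.List.pyGetD ((PySem.Str.split? line " (contains ").getD []) 0 ""))
      let allerg := (PySem.Str.split? (PySem.Str.slice
        (PySem.List.pyGetD ((PySem.Str.split? line " (contains ").getD []) 1 "") none (some (-1))) ", ").getD []
      let ingredients := PySem.Set.union st.2 ingreds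
      let allergenss := allerg.foldl (fun d a =>
        if d.contains a = false then d.insert a ingreds
        else d.insert a (PySem.Set.inter (d.getD a []) ingreds)) st.1
      (allergenss, ingredients)) (d, ing)).2
    = (inp.foldl (fun (st : List String × PySem.Dict String (List (List String))) line =>
      let ingreds := PySem.Set.ofList (PySem.Str.split₀
        (PySem.List.pyGetD ((PySem.Str.split? line " (contains ").getD []) 0 ""))
      let ingredients := PySem.Set.union st.1 ingreds
      let groups := ((PySem.Str.split? (PySem.Str.slice
          (PySem.List.pyGetD ((PySem.Str.split? line " (contains ").getD []) 1 "") none (some (-1))) ", ").getD []).foldl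
        (fun g a => g.modify a [] (fun l => l ++ [ingreds])) st.2
      (ingredients, groups)) (ing, g)).1
    ∧ AB_Inv (inp.foldl (fun (st : PySem.Dict String (List String) × List String) line =>
      let ingreds := PySem.Set.ofList (PySem.Str.split₀
        (PySem.List.pyGetD ((PySem.Str.split? line " (contains ").getD []) 0 ""))
      let allerg := (PySem.Str.split? (PySem.Str.slice
        (PySem.List.pyGetD ((PySem.Str.split? line " (contains ").getD []) 1 "") none (some (-1))) ", ").getD []
      let ingredients := PySem.Set.union st.2 ingreds
      let allergenss := allerg.foldl (fun d a =>
        if d.contains a = false then d.insert a ingreds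
        else d.insert a (PySem.Set.inter (d.getD a []) ingreds)) st.1
      (allergenss, ingredients)) (d, ing)).1
      (inp.foldl (fun (st : List String × PySem.Dict String (List (List String))) line =>
      let ingreds := PySem.Set.ofList (PySem.Str.split₀
        (PySem.List.pyGetD ((PySem.Str.split? line " (contains ").getD []) 0 ""))
      let ingredients := PySem.Set.union st.1 ingreds
      let groups := ((PySem.Str.split? (PySem.Str.slice
          (PySem.List.pyGetD ((PySem.Str.split? line " (contains ").getD []) 1 "") none (some (-1))) ", ").getD []).foldl
        (fun g a => g.modify a [] (fun l => l ++ [ingreds])) st.2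
      (ingredients, groups)) (ing, g)).2 := by
  induction inp generalizing d g ing with
  | nil => exact ⟨rfl, h⟩
  | cons line rest ih =>
    simp only [List.foldl_cons]
    exact ih _ _ _ (AB_Inv_loop _ _ (PySem.Set.nodup_ofList _) d g h)

-- final assembly from the invariant
theorem finale (d : PySem.Dict String (List String)) (g : PySem.Dict String (List (List String)))
    (ing : List String) (h : AB_Inv d g) :
    (d.items, d.values.foldl (fun i v => PySem.Set.diff i (PySem.Set.ofList v)) ing)
      = ((g.items.foldl (fun (d : PySem.Dict String (List String)) p =>
            d.insert p.1 (red p.2)) PySem.Dict.empty).items,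
         (g.items.foldl (fun (d : PySem.Dict String (List String)) p =>
            d.insert p.1 (red p.2)) PySem.Dict.empty).values.foldl
           (fun i c => PySem.Set.diff i c) ing) := by
  obtain ⟨hk, hnd, hne, hred, hvnd⟩ := h
  have hdnd : d.keys.Nodup := hk ▸ hnd
  have hB : (g.items.foldl (fun (d : PySem.Dict String (List String)) p =>
      d.insert p.1 (red p.2)) PySem.Dict.empty).items
      = g.items.map (fun p => (p.1, red p.2)) := by
    have := PySem.Dict.items_foldl_insert_fresh g.items Prod.fst (fun p => red p.2)
      PySem.Dict.empty (fun a _ => PySem.Dict.contains_empty a.1) hnd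
    simpa using this
  have hitems : d.items = g.items.map (fun p => (p.1, red p.2)) := by
    rw [PySem.Dict.items_eq_map_keys d hdnd [], PySem.Dict.items_eq_map_keys g hnd [],
      List.map_map, hk]
    exact List.map_congr_left (fun k _ => by simp [hred k])
  refine Prod.ext ?_ ?_
  · simp only [hB, hitems]
  · show d.values.foldl _ ing = _
    have hvals : d.values
        = (g.items.foldl (fun (d : PySem.Dict String (List String)) p =>
            d.insert p.1 (red p.2)) PySem.Dict.empty).values := by
      simp only [PySem.Dict.values, hB, hitems]
    rw [← hvals]
    apply PySem.List.foldl_congr_mem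
    intro acc v hv
    have : v.Nodup := by
      rw [PySem.Dict.values_eq_map_keys d hdnd []] at hv
      obtain ⟨k, _, rfl⟩ := List.mem_map.mp hv
      exact hvnd k
    rw [PySem.Set.ofList_eq_self_of_nodup v this]

-- ===== VERDICT (by name: the statement is the Claim_ definition above) =====
theorem parse_spec : Claim_equal_parse := by
  intro inp _ _
  show parse inp = parse_alt inp
  simp only [parse, parse_alt]
  obtain ⟨hing, hinv⟩ := main_loop inp PySem.Dict.empty PySem.Dict.empty [] AB_Inv_empty
  rw [hing]
  exact finale _ _ _ hinv
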